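-- pv_equiv track=rewrite | github.com/JonusNattapong/DekDataset | src/python/dataset_quality_check.py | check_duplicate_questions
-- ===== SOURCE A (Python) =====
-- def check_duplicate_questions(data):
--     """ตรวจสอบคำถามที่ซ้ำกัน"""
--     questions = {}
--     duplicates = 0
--
--     for item in data:
--         question = item.get("question", "")
--         if question in questions:
--             duplicates += 1
--         else:
--             questions[question] = 1
--
--     return duplicates, len(questions)
-- ===== SOURCE B (Python) =====
-- def check_duplicate_questions(data):
--     """ตรวจสอบคำถามที่ซ้ำกัน"""
--     qs = sorted(item.get("question", "") for item in data)
--     dups = sum(1 for a, b in zip(qs, qs[1:]) if a == b)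
--     return dups, len(qs) - dups
-- ===== Notes on version B (the rewrite author's own statement) =====
-- stated objective: alternative
-- what changed: Replaces A's one-pass hash-dict membership-and-branch loop by a sort-then-scan algorithm: sort the questions, count adjacent equal pairs (duplicates), and derive the unique count as total minus duplicates.
import Mathlib
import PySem

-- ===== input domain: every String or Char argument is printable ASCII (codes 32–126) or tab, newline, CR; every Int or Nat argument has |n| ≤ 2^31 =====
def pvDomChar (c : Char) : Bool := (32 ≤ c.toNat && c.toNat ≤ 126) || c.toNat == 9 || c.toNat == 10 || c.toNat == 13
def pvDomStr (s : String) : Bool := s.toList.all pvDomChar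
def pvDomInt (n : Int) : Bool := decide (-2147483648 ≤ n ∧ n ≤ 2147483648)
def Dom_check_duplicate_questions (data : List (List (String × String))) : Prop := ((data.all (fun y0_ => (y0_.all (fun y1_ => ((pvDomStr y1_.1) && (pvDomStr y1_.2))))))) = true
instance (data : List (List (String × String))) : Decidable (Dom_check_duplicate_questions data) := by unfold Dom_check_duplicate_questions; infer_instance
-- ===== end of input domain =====

-- B replaces A's one-pass dict membership-and-branch loop by sort-then-scan: sort the
-- questions, count adjacent equal pairs as duplicates, unique = total - duplicates (alternative).

-- ===== PORT A =====
-- loop: for item in data: q = item.get("question",""); if q in questions: duplicates += 1 else: questions[q] = 1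
def check_duplicate_questions (data : List (List (String × String))) : Int × Int :=
  let st := data.foldl
    (fun (st : PySem.Dict String Int × Int) item =>
      let question := PySem.Dict.getD (PySem.Dict.mk item) "question" ""
      if st.1.contains question then (st.1, st.2 + 1)
      else (st.1.insert question 1, st.2))
    (PySem.Dict.empty, 0)
  (st.2, (PySem.Dict.size st.1 : Int))

-- ===== PORT B =====
-- qs = sorted(item.get("question","") for item in data); dups = sum(1 for a,b in zip(qs, qs[1:]) if a == b)
def check_duplicate_questions_alt (data : List (List (String × String))) : Int × Int :=
  let qs := PySem.List.sorted
    (data.map (fun item => PySem.Dict.getD (PySem.Dict.mk item) "question" ""))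
    (fun x => x) false
  let dups : Int := (qs.zip (PySem.List.slice qs (some 1) none)).foldl
    (fun acc p => if p.1 == p.2 then acc + 1 else acc) 0
  (dups, (qs.length : Int) - dups)

-- ===== PRECONDITION & SPEC =====
def Spec_check_duplicate_questions (data : List (List (String × String))) (out : Int × Int) : Prop := out = check_duplicate_questions_alt data
instance (data : List (List (String × String))) (out : Int × Int) : Decidable (Spec_check_duplicate_questions data out) := by unfold Spec_check_duplicate_questions; infer_instance

-- ===== CLAIM (what is proved, stated in full; the proofs are below) =====
def Claim_equal_check_duplicate_questions : Prop := ∀ (data : List (List (String × String))), Dom_check_duplicate_questions data → Spec_check_duplicate_questions data (check_duplicate_questions data)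

-- ===== LEMMAS AND PROOFS =====

-- loop invariant of A: the dict's keys are the set of questions seen so far, and
-- duplicates + distinct-count = start values + number of items processed
lemma loopA_inv (l : List String) : ∀ (d : PySem.Dict String Int) (c : Int),
    (l.foldl (fun (st : PySem.Dict String Int × Int) q =>
        if st.1.contains q then (st.1, st.2 + 1) else (st.1.insert q 1, st.2)) (d, c)
      = ((l.foldl (fun (d' : PySem.Dict String Int) q =>
            if d'.contains q then d' else d'.insert q 1) d),
         c + (l.length : Int) + (d.keys.length : Int)
           - ((PySem.Set.update d.keys l).length : Int))) ∧
    (l.foldl (fun (d' : PySem.Dict String Int) q =>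
        if d'.contains q then d' else d'.insert q 1) d).keys = PySem.Set.update d.keys l := by
  induction l with
  | nil =>
    intro d c
    refine ⟨?_, rfl⟩
    simp [PySem.Set.update]
  | cons q t ih =>
    intro d c
    by_cases h : d.contains q = true
    · have hadd : PySem.Set.add d.keys q = d.keys := by
        simp [PySem.Set.add, PySem.Set.contains, ← PySem.Dict.contains_eq_decide_mem_keys, h]
      refine ⟨?_, ?_⟩
      · simp only [List.foldl_cons, h, if_true]
        rw [(ih d (c + 1)).1]
        simp only [PySem.Set.update, List.foldl_cons, hadd, List.length_cons]
        congr 1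
        push_cast; ring
      · simp only [List.foldl_cons, h, if_true]
        have := (ih d c).2
        simpa [PySem.Set.update, hadd] using this
    · have hkeys : (d.insert q 1).keys = d.keys ++ [q] :=
        PySem.Dict.keys_insert_of_not_contains d 1 (by simpa using h)
      have hadd : PySem.Set.add d.keys q = d.keys ++ [q] := by
        simp [PySem.Set.add, PySem.Set.contains, ← PySem.Dict.contains_eq_decide_mem_keys, h]
      refine ⟨?_, ?_⟩
      · simp only [List.foldl_cons, h, if_false, Bool.false_eq_true]
        rw [(ih (d.insert q 1) c).1]
        simp only [PySem.Set.update, List.foldl_cons, hadd, hkeys, List.length_cons,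
          List.length_append, List.length_nil]
        congr 1
        push_cast; ring
      · simp only [List.foldl_cons, h, if_false, Bool.false_eq_true]
        have := (ih (d.insert q 1) c).2
        simpa [PySem.Set.update, hadd, hkeys] using this

-- the fold of A over data is the fold over the mapped question list
lemma foldA_map (data : List (List (String × String))) (st : PySem.Dict String Int × Int) :
    data.foldl (fun (st : PySem.Dict String Int × Int) item =>
      let question := PySem.Dict.getD (PySem.Dict.mk item) "question" ""
      if st.1.contains question then (st.1, st.2 + 1) else (st.1.insert question 1, st.2)) st
    = (data.map (fun item => PySem.Dict.getD (PySem.Dict.mk item) "question" "")).foldl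
        (fun (st : PySem.Dict String Int × Int) q =>
          if st.1.contains q then (st.1, st.2 + 1) else (st.1.insert q 1, st.2)) st := by
  rw [List.foldl_map]

-- the distinct count of a list is its Finset cardinality
lemma ofList_length_eq_card (l : List String) :
    (PySem.Set.ofList l).length = l.toFinset.card := by
  have hn : (PySem.Set.ofList l).Nodup := PySem.Set.nodup_ofList l
  have hf : (PySem.Set.ofList l).toFinset = l.toFinset := by
    ext x
    simp [PySem.Set.mem_ofList]
  rw [← hf, List.toFinset_card_of_nodup hn]

-- in a ≤-sorted list, adjacent-equal pairs + distinct values = length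
lemma adj_sorted : ∀ (s : List String), s.Pairwise (· ≤ ·) →
    (s.zip s.tail).countP (fun p => decide (p.1 = p.2)) + s.toFinset.card = s.length := by
  intro s
  induction s with
  | nil => intro _; simp
  | cons a t ih =>
    intro hp
    cases t with
    | nil => simp
    | cons b u =>
      have hpt : (b :: u).Pairwise (· ≤ ·) := hp.tail
      have hab : a ≤ b := (List.pairwise_cons.mp hp).1 b (by simp)
      have hrec := ih hpt
      by_cases hEq : a = b
      · subst hEq
        simp only [List.tail_cons] at hrec
        simp at hrec ⊢
        omega
      · have hnot : a ∉ b :: u := by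
          intro hmem
          rcases List.mem_cons.mp hmem with h | h
          · exact hEq h
          · have hba : b ≤ a := ((List.pairwise_cons.mp hpt).1 a h)
            exact hEq (le_antisymm hab hba)
        have hcard : (insert a (insert b u.toFinset)).card = (insert b u.toFinset).card + 1 := by
          rw [Finset.card_insert_of_notMem]
          simpa using hnot
        simp only [List.tail_cons] at hrec
        simp [hEq] at hrec ⊢
        omega

-- ===== VERDICT (by name: the statement is the Claim_ definition above) =====
theorem check_duplicate_questions_spec : Claim_equal_check_duplicate_questions := by
  intro data _
  unfold Spec_check_duplicate_questions check_duplicate_questions check_duplicate_questions_alt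
  have hm := foldA_map data (PySem.Dict.empty, 0)
  obtain ⟨h1, h2⟩ :=
    loopA_inv (data.map (fun item => PySem.Dict.getD (PySem.Dict.mk item) "question" ""))
      PySem.Dict.empty 0
  have hAsize : (((data.map (fun item => PySem.Dict.getD (PySem.Dict.mk item) "question" "")).foldl
      (fun (d' : PySem.Dict String Int) q =>
        if d'.contains q then d' else d'.insert q 1) PySem.Dict.empty)).size
      = (PySem.Set.ofList
          (data.map (fun item => PySem.Dict.getD (PySem.Dict.mk item) "question" ""))).length := by
    have := congrArg List.length h2
    simpa [PySem.Dict.size, PySem.Dict.keys, PySem.Set.update, PySem.Set.ofList_eq_foldl,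
      PySem.Dict.keys_empty] using this
  have hperm := PySem.List.sorted_perm
    (data.map (fun item => PySem.Dict.getD (PySem.Dict.mk item) "question" "")) (fun x => x) false
  have hpair : (PySem.List.sorted
      (data.map (fun item => PySem.Dict.getD (PySem.Dict.mk item) "question" ""))
      (fun x => x) false).Pairwise (· ≤ ·) := by
    simpa using PySem.List.sorted_pairwise
      (data.map (fun item => PySem.Dict.getD (PySem.Dict.mk item) "question" "")) (fun x => x)
  have hadj := adj_sorted _ hpair
  have htf : (PySem.List.sorted
      (data.map (fun item => PySem.Dict.getD (PySem.Dict.mk item) "question" ""))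
      (fun x => x) false).toFinset
      = (data.map (fun item => PySem.Dict.getD (PySem.Dict.mk item) "question" "")).toFinset := by
    ext x; simp [hperm.mem_iff]
  have hlen := hperm.length_eq
  have hu := ofList_length_eq_card
    (data.map (fun item => PySem.Dict.getD (PySem.Dict.mk item) "question" ""))
  rw [htf, hlen, ← hu] at hadj
  have hfoldB : ((PySem.List.sorted
        (data.map (fun item => PySem.Dict.getD (PySem.Dict.mk item) "question" ""))
        (fun x => x) false).zip
       (PySem.List.sorted
        (data.map (fun item => PySem.Dict.getD (PySem.Dict.mk item) "question" ""))
        (fun x => x) false).tail).foldl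
      (fun (acc : Int) p => if p.1 == p.2 then acc + 1 else acc) 0
      = (((PySem.List.sorted
        (data.map (fun item => PySem.Dict.getD (PySem.Dict.mk item) "question" ""))
        (fun x => x) false).zip
       (PySem.List.sorted
        (data.map (fun item => PySem.Dict.getD (PySem.Dict.mk item) "question" ""))
        (fun x => x) false).tail).countP (fun p => decide (p.1 = p.2)) : Int) := by
    simp [PySem.List.foldl_ite_add_one]
  simp only [hm, h1, hAsize, PySem.Dict.keys_empty, List.length_nil, PySem.Set.update,
    ← PySem.Set.ofList_eq_foldl, PySem.List.slice_from_one, hfoldB, hlen]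
  rw [Prod.mk.injEq]
  refine ⟨?_, ?_⟩ <;> · push_cast; omega
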